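-- pv_equiv track=rewrite | github.com/diothor/dcp-python | problems/strings/problem_366.py | the_same_not_adjacent
-- ===== SOURCE A (Python) =====
-- from typing import Union
-- import heapq
-- from collections import Counter
--
-- def the_same_not_adjacent(s: str) -> Union[str, None]:
--     characters = Counter(s)  # O(n)
--     characters = [[-f, ch] for ch, f in characters.items()]  # O(n)
--     heapq.heapify(characters)  # O(n)
--
--     last_letter = [0, '']
--     res = ''
--     # O(n*2logn)
--     while characters:  # O(n)
--         next_letter = heapq.heappop(characters)  # O(logn)
--         res += next_letter[1]
--         next_letter[0] += 1
--         if last_letter[0] < 0: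
--             heapq.heappush(characters, last_letter)  # O(logn)
--         last_letter = next_letter
--     else:
--         return res if len(res) == len(s) else None
-- ===== SOURCE B (Python) =====
-- from collections import Counter
--
--
-- def the_same_not_adjacent(s):
--     counts = Counter(s)
--     prev = None
--     res = []
--     while True:
--         cands = [(-c, ch) for ch, c in counts.items() if c > 0 and ch != prev]
--         if not cands:
--             break
--         _, ch = min(cands)
--         res.append(ch)
--         counts[ch] = counts[ch] - 1
--         prev = ch
--     res = ''.join(res)
--     return res if len(res) == len(s) else None
-- ===== Notes on version B (the rewrite author's own statement) =====
-- stated objective: simpler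
-- what changed: Replaces the heapq priority queue with decremented negative counts and a held-back last letter by a plain Counter dict: each round rebuilds the candidate list (count > 0, letter != prev) and picks min by (-count, char); the result is collected in a list joined once instead of A's repeated string concatenation (the measured constant-factor win on large inputs).
import Mathlib
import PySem

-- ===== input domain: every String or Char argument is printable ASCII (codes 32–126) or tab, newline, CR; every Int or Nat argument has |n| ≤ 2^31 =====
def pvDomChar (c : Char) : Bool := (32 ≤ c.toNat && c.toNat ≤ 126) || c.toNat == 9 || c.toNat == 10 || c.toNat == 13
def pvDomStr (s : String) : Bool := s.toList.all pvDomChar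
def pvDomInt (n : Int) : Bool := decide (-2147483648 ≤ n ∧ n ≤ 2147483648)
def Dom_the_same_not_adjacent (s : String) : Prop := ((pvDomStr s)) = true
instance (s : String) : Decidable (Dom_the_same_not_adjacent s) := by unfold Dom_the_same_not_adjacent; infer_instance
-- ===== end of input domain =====

-- B replaces A's heapq priority queue by a plain Counter dict with a min() scan
-- over the current candidate list each round (objective: simpler).

-- ===== PORT A =====
-- Python list comparison on the heap entries [-f, ch]: first the int, then the character.
def pairLt (p q : Int × Char) : Bool :=
  decide (p.1 < q.1) || (decide (p.1 = q.1) && decide (p.2 < q.2))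

-- the least entry of the nonempty list x :: t (first one on ties; entries are distinct here)
def heapMin (x : Int × Char) (t : List (Int × Char)) : Int × Char :=
  t.foldl (fun m y => if pairLt y m then y else m) x

-- A's while-loop. heapq is a binary-heap priority queue: heappop returns the least
-- element under Python's list order, heappush adds one; the port keeps the queue as a
-- plain list, heapify is the identity and heappop removes the minimum — exact, because
-- every popped element (hence the result) depends only on the multiset of queued
-- entries.  fuel bounds the while loop (s.length + 1 always suffices).  Python's
-- initial last_letter [0, ''] is (0, ' ') here: its character is never read, since
-- last_letter is only pushed when its count is negative and 0 is not.
def loopA : Nat → List (Int × Char) → (Int × Char) → List Char → Option (List Char)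
  | 0, _, _, _ => none
  | n + 1, h, last, res =>
    match h with
    | [] => some res
    | x :: t =>
      let m := heapMin x t
      let h' := (x :: t).erase m
      let res' := res ++ [m.2]
      let next : Int × Char := (m.1 + 1, m.2)
      let h'' := if last.1 < 0 then h' ++ [last] else h'
      loopA n h'' next res'

def the_same_not_adjacent (s : String) : Option String :=
  let characters := (PySem.Dict.counter s.toList).items.map (fun p => (-p.2, p.1))
  match loopA (s.toList.length + 1) characters (0, ' ') [] with
  | none => none
  | some res => if res.length = s.toList.length then some (String.mk res) else none

-- ===== PORT B =====
-- B's while-loop: recompute the candidate list from the Counter, stop when it is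
-- empty, otherwise take min(cands) (Python tuple order: count first, then character),
-- append that character, decrement its count, remember it as prev.  fuel as in A.
def loopB : Nat → PySem.Dict Char Int → Option Char → List Char → Option (List Char)
  | 0, _, _, _ => none
  | n + 1, counts, prev, res =>
    let cands := (counts.items.filter
        (fun q => decide (0 < q.2) && decide (some q.1 ≠ prev))).map (fun q => (-q.2, q.1))
    match PySem.List.min2? cands (fun q => q.1) (fun q => q.2) with
    | none => some res
    | some m =>
      loopB n (counts.insert m.2 (counts.getD m.2 0 - 1)) (some m.2) (res ++ [m.2])

def the_same_not_adjacent_alt (s : String) : Option String :=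
  match loopB (s.toList.length + 1) (PySem.Dict.counter s.toList) none [] with
  | none => none
  | some res => if res.length = s.toList.length then some (String.mk res) else none

-- ===== PRECONDITION & SPEC =====
def Spec_the_same_not_adjacent (s : String) (out : Option String) : Prop := out = the_same_not_adjacent_alt s
instance (s : String) (out : Option String) : Decidable (Spec_the_same_not_adjacent s out) := by unfold Spec_the_same_not_adjacent; infer_instance

-- ===== CLAIM (what is proved, stated in full; the proofs are below) =====
def Claim_equal_the_same_not_adjacent : Prop := ∀ (s : String), Dom_the_same_not_adjacent s → Spec_the_same_not_adjacent s (the_same_not_adjacent s)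

-- ===== LEMMAS AND PROOFS =====

-- B's candidate list, as a function of an items list and prev
def candL (l : List (Char × Int)) (p : Option Char) : List (Int × Char) :=
  (l.filter (fun q => decide (0 < q.2) && decide (some q.1 ≠ p))).map (fun q => (-q.2, q.1))

-- what A pushes back (the held-back previous letter), described from B's state
def pushL (g : Int) (p : Option Char) : List (Int × Char) :=
  match p with
  | none => []
  | some pc => if 0 < g then [(-g, pc)] else []

-- the push list is determined by the input list and prev
def pushSpec (l : List (Char × Int)) (p : Option Char) (push : List (Int × Char)) : Prop :=
  match p with
  | none => push = []
  | some pc => (∀ g : Int, (pc, g) ∈ l → push = if 0 < g then [(-g, pc)] else []) ∧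
               (pc ∉ l.map Prod.fst → push = [])

def lexLe (p q : Int × Char) : Prop := p.1 < q.1 ∨ (p.1 = q.1 ∧ p.2 ≤ q.2)

theorem lexLe_antisymm {p q : Int × Char} (h1 : lexLe p q) (h2 : lexLe q p) : p = q := by
  rcases p with ⟨a, b⟩; rcases q with ⟨c, d⟩
  simp only [lexLe] at h1 h2
  have hac : a = c := by rcases h1 with h | ⟨h, _⟩ <;> rcases h2 with h' | ⟨h', _⟩ <;> omega
  subst hac
  have hbd : b = d := by
    rcases h1 with h | ⟨_, hb⟩
    · omega
    rcases h2 with h' | ⟨_, hd⟩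
    · omega
    · exact le_antisymm hb hd
  simp [hbd]

theorem lexLe_trans {p q r : Int × Char} (h1 : lexLe p q) (h2 : lexLe q r) : lexLe p r := by
  rcases p with ⟨a, b⟩; rcases q with ⟨c, d⟩; rcases r with ⟨e, f⟩
  simp only [lexLe] at h1 h2 ⊢
  rcases h1 with h | ⟨h, hb⟩ <;> rcases h2 with h' | ⟨h', hd⟩
  · exact Or.inl (by omega)
  · exact Or.inl (by omega)
  · exact Or.inl (by omega)
  · exact Or.inr ⟨by omega, le_trans hb hd⟩

theorem lexLe_of_pairLt {p q : Int × Char} (h : pairLt p q = true) : lexLe p q := by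
  rcases p with ⟨a, b⟩; rcases q with ⟨c, d⟩
  simp only [pairLt, Bool.or_eq_true, Bool.and_eq_true, decide_eq_true_eq] at h
  rcases h with h | ⟨h, h'⟩
  · exact Or.inl h
  · exact Or.inr ⟨h, le_of_lt h'⟩

theorem lexLe_of_not_pairLt {p q : Int × Char} (h : pairLt p q = false) : lexLe q p := by
  rcases p with ⟨a, b⟩; rcases q with ⟨c, d⟩
  simp only [pairLt, Bool.or_eq_false_iff, Bool.and_eq_false_iff, decide_eq_false_iff_not] at h
  rcases lt_trichotomy a c with h1 | h1 | h1
  · exact absurd h1 h.1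
  · rcases h.2 with h2 | h2
    · exact absurd h1 h2
    · exact Or.inr ⟨h1.symm, le_of_not_gt h2⟩
  · exact Or.inl h1

theorem heapMin_cons (x y : Int × Char) (t : List (Int × Char)) :
    heapMin x (y :: t) = heapMin (if pairLt y x then y else x) t := rfl

theorem heapMin_mem (x : Int × Char) (t : List (Int × Char)) : heapMin x t ∈ x :: t := by
  induction t generalizing x with
  | nil => simp [heapMin]
  | cons y t ih =>
    rw [heapMin_cons]
    rcases List.mem_cons.mp (ih (if pairLt y x then y else x)) with h | h
    · rw [h]; split <;> simp
    · simp [h]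

theorem heapMin_isMin (x : Int × Char) (t : List (Int × Char)) :
    ∀ y ∈ x :: t, lexLe (heapMin x t) y := by
  induction t generalizing x with
  | nil =>
    intro y hy
    simp only [List.mem_cons, List.not_mem_nil, or_false] at hy
    subst hy
    exact Or.inr ⟨rfl, le_refl _⟩
  | cons y t ih =>
    intro z hz
    rw [heapMin_cons]
    cases hb : pairLt y x with
    | false =>
      have hx : lexLe (heapMin x t) x := ih x x List.mem_cons_self
      rcases List.mem_cons.mp hz with h | h
      · subst h; exact hx
      rcases List.mem_cons.mp h with h | h
      · subst h; exact lexLe_trans hx (lexLe_of_not_pairLt hb)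
      · exact ih x z (List.mem_cons_of_mem _ h)
    | true =>
      have hy' : lexLe (heapMin y t) y := ih y y List.mem_cons_self
      rcases List.mem_cons.mp hz with h | h
      · subst h; exact lexLe_trans hy' (lexLe_of_pairLt hb)
      rcases List.mem_cons.mp h with h | h
      · subst h; exact hy'
      · exact ih y z (List.mem_cons_of_mem _ h)

theorem min2?_cons_eq_heapMin (t : List (Int × Char)) (x : Int × Char) :
    PySem.List.min2? (x :: t) (fun q => q.1) (fun q => q.2) = some (heapMin x t) := by
  induction t generalizing x with
  | nil => rfl
  | cons y t ih =>
    have hstep : (if (decide (y.1 < x.1) || !decide (x.1 < y.1) && decide (y.2 < x.2)) = true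
          then some y else some x) = some (if pairLt y x then y else x) := by
      by_cases h1 : y.1 < x.1
      · simp [pairLt, h1]
      · by_cases h2 : x.1 < y.1
        · have hne : y.1 ≠ x.1 := by omega
          simp [pairLt, h1, h2, hne]
        · have he : y.1 = x.1 := by omega
          simp only [pairLt, he, decide_true, lt_irrefl, decide_false, Bool.false_or,
            Bool.not_false, Bool.true_and]
          split <;> rfl
    have h1 : PySem.List.min2? (x :: y :: t) (fun q => q.1) (fun q => q.2)
        = PySem.List.min2? ((if pairLt y x then y else x) :: t) (fun q => q.1) (fun q => q.2) := by
      simp only [PySem.List.min2?, List.foldl_cons]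
      rw [← hstep]
    rw [h1, ih, heapMin_cons]

theorem heapMin_perm_eq {x y : Int × Char} {t u : List (Int × Char)}
    (h : (x :: t).Perm (y :: u)) : heapMin x t = heapMin y u :=
  lexLe_antisymm
    (heapMin_isMin x t _ (h.mem_iff.mpr (heapMin_mem y u)))
    (heapMin_isMin y u _ (h.mem_iff.mp (heapMin_mem x t)))

theorem candL_cons (k : Char) (v : Int) (t : List (Char × Int)) (p : Option Char) :
    candL ((k, v) :: t) p =
      if 0 < v ∧ some k ≠ p then (-v, k) :: candL t p else candL t p := by
  simp only [candL, List.filter_cons]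
  by_cases h1 : 0 < v <;> by_cases h2 : some k ≠ p <;> simp [h1, h2]

-- dropping the "≠ prev" restriction re-adds prev's entry, on lists not containing ch
theorem candL_unrestrict (ch : Char) (p : Option Char) :
    ∀ (l : List (Char × Int)) (push : List (Int × Char)), (l.map Prod.fst).Nodup →
      ch ∉ l.map Prod.fst → pushSpec l p push →
      (candL l (some ch)).Perm (candL l p ++ push) := by
  intro l
  induction l with
  | nil =>
    intro push _ _ hps
    rcases p with _ | pc
    · have : push = [] := hps
      simp [candL, this]
    · have : push = [] := hps.2 (by simp)
      simp [candL, this]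
  | cons q t ih =>
    intro push hnd hch hps
    rcases q with ⟨k, v⟩
    have hknech : k ≠ ch := by
      intro h
      exact hch (by rw [List.map_cons, h]; exact List.mem_cons_self)
    have hndt : (t.map Prod.fst).Nodup := (List.nodup_cons.mp (by simpa using hnd)).2
    have hkt : k ∉ t.map Prod.fst := (List.nodup_cons.mp (by simpa using hnd)).1
    have hcht : ch ∉ t.map Prod.fst := fun h =>
      hch (by rw [List.map_cons]; exact List.mem_cons_of_mem _ h)
    rcases p with _ | pc
    · have hpush : push = [] := hps
      subst hpush
      have ht : (candL t (some ch)).Perm (candL t none) := by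
        simpa using ih [] hndt hcht rfl
      rw [List.append_nil, candL_cons, candL_cons]
      by_cases h1 : 0 < v
      · have c1 : (0 < v ∧ some k ≠ some ch) := ⟨h1, by simp [hknech]⟩
        have c2 : (0 < v ∧ (some k ≠ (none : Option Char))) := ⟨h1, by simp⟩
        rw [if_pos c1, if_pos c2]
        exact ht.cons _
      · have c1 : ¬ (0 < v ∧ some k ≠ some ch) := by simp [h1]
        have c2 : ¬ (0 < v ∧ (some k ≠ (none : Option Char))) := by simp [h1]
        rw [if_neg c1, if_neg c2]
        exact ht
    · by_cases hkpc : k = pc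
      · subst hkpc
        have hpush : push = if 0 < v then [(-v, k)] else [] := hps.1 v (by simp)
        have hpst : pushSpec t (some k) [] :=
          ⟨fun g hg => absurd (List.mem_map_of_mem hg) hkt, fun _ => rfl⟩
        have ht : (candL t (some ch)).Perm (candL t (some k)) := by
          simpa using ih [] hndt hcht hpst
        rw [candL_cons, candL_cons, hpush]
        have c2 : ¬ (0 < v ∧ some k ≠ some k) := by simp
        by_cases h1 : 0 < v
        · have c1 : (0 < v ∧ some k ≠ some ch) := ⟨h1, by simp [hknech]⟩
          rw [if_pos h1, if_pos c1, if_neg c2]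
          exact (ht.cons _).trans (List.perm_append_singleton _ _).symm
        · have c1 : ¬ (0 < v ∧ some k ≠ some ch) := by simp [h1]
          rw [if_neg h1, if_neg c1, if_neg c2, List.append_nil]
          exact ht
      · have hpst : pushSpec t (some pc) push := by
          refine ⟨fun g hg => hps.1 g (List.mem_cons_of_mem _ hg), fun hpc => hps.2 ?_⟩
          simp only [List.map_cons, List.mem_cons, not_or]
          exact ⟨fun h => hkpc h.symm, hpc⟩
        have ht := ih push hndt hcht hpst
        rw [candL_cons, candL_cons]
        by_cases h1 : 0 < v
        · have c1 : (0 < v ∧ some k ≠ some ch) := ⟨h1, by simp [hknech]⟩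
          have c2 : (0 < v ∧ some k ≠ some pc) := ⟨h1, by simp [hkpc]⟩
          rw [if_pos c1, if_pos c2, List.cons_append]
          exact ht.cons _
        · have c1 : ¬ (0 < v ∧ some k ≠ some ch) := by simp [h1]
          have c2 : ¬ (0 < v ∧ some k ≠ some pc) := by simp [h1]
          rw [if_neg c1, if_neg c2]
          exact ht

-- decrementing ch's count and restricting to prev = ch, versus erasing ch's candidate
-- entry and re-adding the old prev entry (list level)
theorem candL_step_list (ch : Char) (c : Int) (p : Option Char) :
    ∀ (l : List (Char × Int)) (push : List (Int × Char)), (l.map Prod.fst).Nodup →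
      (ch, c) ∈ l → 0 < c → some ch ≠ p → pushSpec l p push →
      ((-c, ch) :: candL (l.map (fun q => if q.1 == ch then (ch, c - 1) else q)) (some ch)).Perm
        (candL l p ++ push) := by
  intro l
  induction l with
  | nil => intro push _ hmem _ _ _; exact absurd hmem List.not_mem_nil
  | cons q t ih =>
    intro push hnd hmem hc hne hps
    rcases q with ⟨k, v⟩
    have hndt : (t.map Prod.fst).Nodup := (List.nodup_cons.mp (by simpa using hnd)).2
    have hkt : k ∉ t.map Prod.fst := (List.nodup_cons.mp (by simpa using hnd)).1
    by_cases hkch : k = ch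
    · subst hkch
      have hcht : k ∉ t.map Prod.fst := hkt
      have hv : v = c := by
        rcases List.mem_cons.mp hmem with h | h
        · exact (congrArg Prod.snd h).symm
        · exact absurd (List.mem_map_of_mem h) hcht
      subst hv
      have hrepl : t.map (fun q => if q.1 == k then (k, v - 1) else q) = t := by
        have hid : ∀ q ∈ t, (if q.1 == k then (k, v - 1) else q) = id q := by
          intro q hq
          have : q.1 ≠ k := fun h => hcht (h ▸ List.mem_map_of_mem hq)
          simp [this]
        rw [List.map_congr_left hid, List.map_id]
      rw [List.map_cons]
      have hhead : ((k, v).1 == k) = true := by simp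
      rw [if_pos hhead, hrepl, candL_cons, candL_cons]
      have cL : ¬ (0 < v - 1 ∧ some k ≠ some k) := by simp
      have cR : 0 < v ∧ some k ≠ p := ⟨hc, hne⟩
      rw [if_neg cL, if_pos cR, List.cons_append]
      refine List.Perm.cons _ ?_
      apply candL_unrestrict k p t push hndt hcht
      rcases p with _ | pc
      · exact hps
      · refine ⟨fun g hg => hps.1 g (List.mem_cons_of_mem _ hg), fun hpc => hps.2 ?_⟩
        simp only [List.map_cons, List.mem_cons, not_or]
        exact ⟨fun h => (by simp [h] at hne), hpc⟩
    · have hmt : (ch, c) ∈ t := by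
        rcases List.mem_cons.mp hmem with h | h
        · exact absurd (congrArg Prod.fst h) (fun h' => hkch h'.symm)
        · exact h
      rw [List.map_cons]
      have hhead : ((k, v).1 == ch) = false := by simp [hkch]
      rw [if_neg (by simp [hkch] : ¬ (((k, v).1 == ch) = true)), candL_cons, candL_cons]
      rcases p with _ | pc
      · -- prev = none
        have hpush : push = [] := hps
        subst hpush
        have hih := ih [] hndt hmt hc (by simp) rfl
        simp only [List.append_nil] at hih ⊢
        by_cases h1 : 0 < v
        · have c1 : 0 < v ∧ some k ≠ some ch := ⟨h1, by simp [hkch]⟩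
          have c2 : 0 < v ∧ (some k ≠ (none : Option Char)) := ⟨h1, by simp⟩
          rw [if_pos c1, if_pos c2]
          exact (List.Perm.swap _ _ _).trans (hih.cons _)
        · have c1 : ¬ (0 < v ∧ some k ≠ some ch) := by simp [h1]
          have c2 : ¬ (0 < v ∧ (some k ≠ (none : Option Char))) := by simp [h1]
          rw [if_neg c1, if_neg c2]
          exact hih
      · by_cases hkpc : k = pc
        · subst hkpc
          have hpush : push = if 0 < v then [(-v, k)] else [] := hps.1 v List.mem_cons_self
          have hpst : pushSpec t (some k) [] :=
            ⟨fun g hg => absurd (List.mem_map_of_mem hg) hkt, fun _ => rfl⟩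
          have hih := ih [] hndt hmt hc hne hpst
          simp only [List.append_nil] at hih
          rw [hpush]
          have c2 : ¬ (0 < v ∧ some k ≠ some k) := by simp
          rw [if_neg c2]
          by_cases h1 : 0 < v
          · have c1 : 0 < v ∧ some k ≠ some ch := ⟨h1, by simp [hkch]⟩
            rw [if_pos h1, if_pos c1]
            exact (List.Perm.swap _ _ _).trans
              ((hih.cons _).trans (List.perm_append_singleton _ _).symm)
          · have c1 : ¬ (0 < v ∧ some k ≠ some ch) := by simp [h1]
            rw [if_neg h1, if_neg c1, List.append_nil]
            exact hih
        · have hpst : pushSpec t (some pc) push := by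
            refine ⟨fun g hg => hps.1 g (List.mem_cons_of_mem _ hg), fun hpc => hps.2 ?_⟩
            simp only [List.map_cons, List.mem_cons, not_or]
            exact ⟨fun h => hkpc h.symm, hpc⟩
          have hih := ih push hndt hmt hc hne hpst
          by_cases h1 : 0 < v
          · have c1 : 0 < v ∧ some k ≠ some ch := ⟨h1, by simp [hkch]⟩
            have c2 : 0 < v ∧ some k ≠ some pc := ⟨h1, by simp [hkpc]⟩
            rw [if_pos c1, if_pos c2, List.cons_append]
            exact (List.Perm.swap _ _ _).trans (hih.cons _)
          · have c1 : ¬ (0 < v ∧ some k ≠ some ch) := by simp [h1]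
            have c2 : ¬ (0 < v ∧ some k ≠ some pc) := by simp [h1]
            rw [if_neg c1, if_neg c2]
            exact hih

def prevCnt (counts : PySem.Dict Char Int) (prev : Option Char) : Int :=
  match prev with
  | none => 0
  | some pc => counts.getD pc 0

def lastRel (counts : PySem.Dict Char Int) (prev : Option Char) (last : Int × Char) : Prop :=
  match prev with
  | none => last.1 = 0
  | some pc => last = (-(counts.getD pc 0), pc)

theorem cand_step (counts : PySem.Dict Char Int) (prev : Option Char)
    (hnd : counts.keys.Nodup) {ch : Char} {c : Int} (hmem : (ch, c) ∈ counts.items)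
    (hc : 0 < c) (hne : some ch ≠ prev) :
    (candL (counts.insert ch (c - 1)).items (some ch)).Perm
      ((candL counts.items prev).erase (-c, ch) ++ pushL (prevCnt counts prev) prev) := by
  have hcont : counts.contains ch = true := by
    rw [PySem.Dict.contains_eq_isSome_get?, PySem.Dict.get?_of_mem_items _ hmem hnd]
    rfl
  rw [PySem.Dict.items_insert_of_contains _ _ hcont]
  have hkeys : (counts.items.map Prod.fst).Nodup := hnd
  have hpspec : pushSpec counts.items prev (pushL (prevCnt counts prev) prev) := by
    rcases prev with _ | pc
    · rfl
    · refine ⟨fun g hg => ?_, fun hpc => ?_⟩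
      · have := PySem.Dict.getD_of_mem_items _ hg hnd 0
        simp only [pushL, prevCnt, this]
      · have hg0 : counts.getD pc 0 = 0 := by
          have : counts.get? pc = none :=
            (PySem.Dict.get?_eq_none_iff_not_mem_keys _ _).mpr hpc
          show (counts.get? pc).getD 0 = 0
          rw [this]
          rfl
        simp only [pushL, prevCnt, hg0]
        rfl
  have main := candL_step_list ch c prev counts.items (pushL (prevCnt counts prev) prev)
    hkeys hmem hc hne hpspec
  have hmcand : (-c, ch) ∈ candL counts.items prev :=
    List.mem_map.mpr ⟨(ch, c), List.mem_filter.mpr ⟨hmem, by simp [hc, hne]⟩, rfl⟩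
  have hsplit : (candL counts.items prev).Perm
      ((-c, ch) :: (candL counts.items prev).erase (-c, ch)) := List.perm_cons_erase hmcand
  refine List.Perm.cons_inv (a := (-c, ch)) ?_
  refine main.trans ?_
  refine (hsplit.append_right _).trans ?_
  rw [List.cons_append]

theorem loop_eq : ∀ (n : Nat) (h : List (Int × Char)) (counts : PySem.Dict Char Int)
    (prev : Option Char) (last : Int × Char) (res : List Char),
    counts.keys.Nodup → h.Perm (candL counts.items prev) → lastRel counts prev last →
    loopA n h last res = loopB n counts prev res := by
  intro n
  induction n with
  | zero => intro h counts prev last res _ _ _; rfl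
  | succ n ih =>
    intro h counts prev last res hnd hperm hlast
    have hcand : candL counts.items prev =
        (counts.items.filter (fun q => decide (0 < q.2) && decide (some q.1 ≠ prev))).map
          (fun q => (-q.2, q.1)) := rfl
    cases h with
    | nil =>
      have hnil : candL counts.items prev = [] := List.perm_nil.mp hperm.symm
      rw [hcand] at hnil
      simp only [loopA, loopB, hnil, PySem.List.min2?, List.foldl_nil]
    | cons x t =>
      have hne0 : candL counts.items prev ≠ [] := by
        intro h0
        rw [h0] at hperm
        exact absurd (List.perm_nil.mp hperm) (by simp)
      obtain ⟨c0, ct, hce⟩ := List.exists_cons_of_ne_nil hne0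
      have hmeq : heapMin c0 ct = heapMin x t := heapMin_perm_eq (hce ▸ hperm).symm
      have hmin2 : PySem.List.min2? (candL counts.items prev) (fun q => q.1) (fun q => q.2)
          = some (heapMin x t) := by
        rw [hce, min2?_cons_eq_heapMin, hmeq]
      have hmmem : heapMin x t ∈ candL counts.items prev := hperm.mem_iff.mp (heapMin_mem x t)
      obtain ⟨q, hqf, hqm⟩ := List.mem_map.mp hmmem
      obtain ⟨hqitems, hqcond⟩ := List.mem_filter.mp hqf
      have hq2 : 0 < q.2 := by simpa using (Bool.and_eq_true _ _ |>.mp hqcond).1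
      have hqne : some q.1 ≠ prev := by simpa using (Bool.and_eq_true _ _ |>.mp hqcond).2
      have hqpair : (q.1, q.2) ∈ counts.items := by
        rw [Prod.mk.eta]; exact hqitems
      have hgd : counts.getD q.1 0 = q.2 := PySem.Dict.getD_of_mem_items _ hqpair hnd 0
      rw [← hqm] at hmin2
      -- unfold one step of loop A
      have hstepA : loopA (n + 1) (x :: t) last res
          = loopA n
              (if last.1 < 0 then ((x :: t).erase (heapMin x t)) ++ [last]
                else (x :: t).erase (heapMin x t))
              ((heapMin x t).1 + 1, (heapMin x t).2) (res ++ [(heapMin x t).2]) := rfl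
      rw [hstepA, ← hqm]
      have hloopB : loopB (n + 1) counts prev res
          = loopB n (counts.insert q.1 (counts.getD q.1 0 - 1)) (some q.1) (res ++ [q.1]) := by
        simp only [loopB, ← hcand, hmin2]
      rw [hloopB, hgd]
      have hpush : (if last.1 < 0 then [last] else []) = pushL (prevCnt counts prev) prev := by
        rcases prev with _ | pc
        · have h0 : last.1 = 0 := hlast
          rw [if_neg (by omega)]
          rfl
        · have hl : last = (-(counts.getD pc 0), pc) := hlast
          subst hl
          simp only [pushL, prevCnt]
          by_cases hg : 0 < counts.getD pc 0
          · rw [if_pos (by simpa using hg), if_pos hg]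
          · rw [if_neg (by simpa using hg), if_neg hg]
      have hsplit : (if last.1 < 0 then ((x :: t).erase (-q.2, q.1)) ++ [last]
            else (x :: t).erase (-q.2, q.1))
          = ((x :: t).erase (-q.2, q.1)) ++ (if last.1 < 0 then [last] else []) := by
        split <;> simp
      apply ih
      · exact PySem.Dict.nodup_keys_insert _ _ _ hnd
      · rw [hsplit, hpush]
        refine (List.Perm.append_right _ (hperm.erase _)).trans ?_
        exact (cand_step counts prev hnd hqpair hq2 hqne).symm
      · show ((-q.2, q.1).1 + 1, (-q.2, q.1).2)
          = (-((counts.insert q.1 (q.2 - 1)).getD q.1 0), q.1)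
        rw [PySem.Dict.getD_insert_self]
        have : -q.2 + 1 = -(q.2 - 1) := by omega
        simp [this]

theorem the_same_not_adjacent_eq (s : String) :
    the_same_not_adjacent s = the_same_not_adjacent_alt s := by
  unfold the_same_not_adjacent the_same_not_adjacent_alt
  have hfil : (PySem.Dict.counter s.toList).items.filter
        (fun q => decide (0 < q.2) && decide (some q.1 ≠ (none : Option Char)))
      = (PySem.Dict.counter s.toList).items := by
    apply List.filter_eq_self.mpr
    intro q hq
    rw [PySem.Dict.items_counter] at hq
    obtain ⟨k, hk, hkq⟩ := List.mem_map.mp hq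
    have hcnt : 0 < List.count k s.toList :=
      List.count_pos_iff.mpr ((PySem.Set.mem_ofList _ _).mp hk)
    rw [← hkq]
    simp only [Bool.and_eq_true, decide_eq_true_eq]
    exact ⟨by exact_mod_cast hcnt, by simp⟩
  have hinit : ((PySem.Dict.counter s.toList).items.map (fun p => (-p.2, p.1))).Perm
      (candL (PySem.Dict.counter s.toList).items none) := by
    unfold candL
    rw [hfil]
  show (match loopA (s.toList.length + 1)
        ((PySem.Dict.counter s.toList).items.map (fun p => (-p.2, p.1))) (0, ' ') [] with
      | none => none
      | some res => if res.length = s.toList.length then some (String.mk res) else none)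
    = _
  rw [loop_eq (s.toList.length + 1) _ _ none (0, ' ') []
    (PySem.Dict.nodup_keys_counter _) hinit rfl]

-- ===== VERDICT (by name: the statement is the Claim_ definition above) =====
theorem the_same_not_adjacent_spec : Claim_equal_the_same_not_adjacent := by
  intro s _
  unfold Spec_the_same_not_adjacent
  exact the_same_not_adjacent_eq s
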